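-- pv_equiv track=rewrite | github.com/albarami/Deckbuilder | src/services/shell_sanitizer.py | _is_forbidden_content
-- ===== SOURCE A (Python) =====
-- def _is_forbidden_content(text: str) -> bool:
--     """Check if text contains forbidden template-example content."""
--     if not text.strip():
--         return False
--     forbidden_markers = [
--         "lorem ipsum", "sample text", "click to edit",
--         "insert text here", "type here", "add text",
--         "example:", "[example", "<example",
--     ]
--     lower = text.lower()
--     return any(marker in lower for marker in forbidden_markers)
-- ===== SOURCE B (Python) =====
-- _MARKER_BY_FIRST_CHAR = {
--     "l": "lorem ipsum",
--     "s": "sample text",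
--     "c": "click to edit",
--     "i": "insert text here",
--     "t": "type here",
--     "a": "add text",
--     "e": "example:",
--     "[": "[example",
--     "<": "<example",
-- }
--
--
-- def _is_forbidden_content(text: str) -> bool:
--     """Check if text contains forbidden template-example content."""
--     # One left-to-right pass: the 9 markers have pairwise-distinct first
--     # characters, so each position is checked against at most one marker,
--     # found by a dict lookup on the current character.  Whitespace-only
--     # text can match no marker, so no strip() guard is needed.
--     lower = text.lower()
--     for i, ch in enumerate(lower):
--         marker = _MARKER_BY_FIRST_CHAR.get(ch)
--         if marker is not None and lower.startswith(marker, i):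
--             return True
--     return False
-- ===== Notes on version B (the rewrite author's own statement) =====
-- stated objective: alternative
-- what changed: Replaces the k separate per-marker substring scans (and the redundant whitespace guard) with one left-to-right pass that dispatches each position through a dict keyed by the markers' pairwise-distinct first characters, so at most one marker is prefix-tested per position.
import Mathlib
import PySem

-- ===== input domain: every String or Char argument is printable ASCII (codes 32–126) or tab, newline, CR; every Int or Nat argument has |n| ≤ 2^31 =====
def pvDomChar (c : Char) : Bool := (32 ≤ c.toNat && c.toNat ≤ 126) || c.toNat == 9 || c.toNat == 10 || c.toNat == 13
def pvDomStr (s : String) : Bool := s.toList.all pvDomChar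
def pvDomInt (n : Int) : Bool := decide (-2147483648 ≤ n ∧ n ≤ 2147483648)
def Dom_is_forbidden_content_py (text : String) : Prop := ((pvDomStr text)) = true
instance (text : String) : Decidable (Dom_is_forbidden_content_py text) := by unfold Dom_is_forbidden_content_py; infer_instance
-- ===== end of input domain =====

-- B drops the redundant strip() guard and replaces the k separate substring scans with one
-- left-to-right pass dispatching each position through the markers' distinct first characters
-- (objective: alternative).

-- ===== PORT A =====
def forbiddenMarkers : List (List Char) :=
  ["lorem ipsum".toList, "sample text".toList, "click to edit".toList,
   "insert text here".toList, "type here".toList, "add text".toList,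
   "example:".toList, "[example".toList, "<example".toList]

def is_forbidden_content_py (text : String) : Bool :=
  if PySem.Chars.strip text.toList = [] then false
  else
    let lower := PySem.Chars.lower text.toList
    forbiddenMarkers.any (fun m => PySem.Chars.isIn m lower)

-- ===== PORT B =====
-- the dict _MARKER_BY_FIRST_CHAR: lookup by first character (keys are pairwise distinct)
def markerFor (c : Char) : Option (List Char) :=
  if c = 'l' then some "lorem ipsum".toList
  else if c = 's' then some "sample text".toList
  else if c = 'c' then some "click to edit".toList
  else if c = 'i' then some "insert text here".toList
  else if c = 't' then some "type here".toList
  else if c = 'a' then some "add text".toList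
  else if c = 'e' then some "example:".toList
  else if c = '[' then some "[example".toList
  else if c = '<' then some "<example".toList
  else none

-- the 'for i, ch in enumerate(lower)' loop with its early return, as structural recursion
def scanForbidden : List Char → Bool
  | [] => false
  | c :: rest =>
    match markerFor c with
    | some m => PySem.Chars.startswith (c :: rest) m || scanForbidden rest
    | none => scanForbidden rest

def is_forbidden_content_py_alt (text : String) : Bool :=
  scanForbidden (PySem.Chars.lower text.toList)

-- ===== PRECONDITION & SPEC =====
def Spec_is_forbidden_content_py (text : String) (out : Bool) : Prop := out = is_forbidden_content_py_alt text
instance (text : String) (out : Bool) : Decidable (Spec_is_forbidden_content_py text out) := by unfold Spec_is_forbidden_content_py; infer_instance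

-- ===== CLAIM (what is proved, stated in full; the proofs are below) =====
def Claim_equal_is_forbidden_content_py : Prop := ∀ (text : String), Dom_is_forbidden_content_py text → Spec_is_forbidden_content_py text (is_forbidden_content_py text)

-- ===== LEMMAS AND PROOFS =====

-- 'sub in (c :: rest)': a match at position 0 or a match further right
lemma isIn_cons (m : List Char) (c : Char) (rest : List Char) :
    PySem.Chars.isIn m (c :: rest)
      = (PySem.Chars.startswith (c :: rest) m || PySem.Chars.isIn m rest) := by
  rw [Bool.eq_iff_iff]
  simp only [Bool.or_eq_true, PySem.Chars.isIn_iff_infix, PySem.Chars.startswith_iff]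
  exact List.infix_cons_iff

-- a marker whose first character differs cannot match at this position
lemma startswith_head_ne {m0 c : Char} {tl s : List Char} (h : m0 ≠ c) :
    PySem.Chars.startswith (c :: s) (m0 :: tl) = false := by
  rw [Bool.eq_false_iff]
  intro hT
  rcases List.cons_prefix_cons.mp ((PySem.Chars.startswith_iff _ _).mp hT) with ⟨h0, -⟩
  exact h h0

-- at a given position, scanning all markers equals the single first-character dispatch
lemma dispatch_eq (c : Char) (s : List Char) :
    forbiddenMarkers.any (fun m => PySem.Chars.startswith (c :: s) m)
      = (match markerFor c with
         | some m => PySem.Chars.startswith (c :: s) m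
         | none => false) := by
  unfold markerFor
  split_ifs with h1 h2 h3 h4 h5 h6 h7 h8 h9
  · simp_all [forbiddenMarkers, PySem.Chars.startswith, List.isPrefixOf]
  · simp_all [forbiddenMarkers, PySem.Chars.startswith, List.isPrefixOf]
  · simp_all [forbiddenMarkers, PySem.Chars.startswith, List.isPrefixOf]
  · simp_all [forbiddenMarkers, PySem.Chars.startswith, List.isPrefixOf]
  · simp_all [forbiddenMarkers, PySem.Chars.startswith, List.isPrefixOf]
  · simp_all [forbiddenMarkers, PySem.Chars.startswith, List.isPrefixOf]
  · simp_all [forbiddenMarkers, PySem.Chars.startswith, List.isPrefixOf]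
  · simp_all [forbiddenMarkers, PySem.Chars.startswith, List.isPrefixOf]
  · simp_all [forbiddenMarkers, PySem.Chars.startswith, List.isPrefixOf]
  · simp only [forbiddenMarkers, List.any_cons, List.any_nil, Bool.or_false]
    rw [show ("lorem ipsum".toList) = 'l' :: "orem ipsum".toList from rfl,
      show ("sample text".toList) = 's' :: "ample text".toList from rfl,
      show ("click to edit".toList) = 'c' :: "lick to edit".toList from rfl,
      show ("insert text here".toList) = 'i' :: "nsert text here".toList from rfl,
      show ("type here".toList) = 't' :: "ype here".toList from rfl,
      show ("add text".toList) = 'a' :: "dd text".toList from rfl,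
      show ("example:".toList) = 'e' :: "xample:".toList from rfl,
      show ("[example".toList) = '[' :: "example".toList from rfl,
      show ("<example".toList) = '<' :: "example".toList from rfl,
      startswith_head_ne (fun h => h1 h.symm), startswith_head_ne (fun h => h2 h.symm),
      startswith_head_ne (fun h => h3 h.symm), startswith_head_ne (fun h => h4 h.symm),
      startswith_head_ne (fun h => h5 h.symm), startswith_head_ne (fun h => h6 h.symm),
      startswith_head_ne (fun h => h7 h.symm), startswith_head_ne (fun h => h8 h.symm),
      startswith_head_ne (fun h => h9 h.symm)]
    simp

lemma scanForbidden_cons (c : Char) (rest : List Char) :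
    scanForbidden (c :: rest)
      = (match markerFor c with
         | some m => PySem.Chars.startswith (c :: rest) m || scanForbidden rest
         | none => scanForbidden rest) := rfl

-- B's single pass computes A's any-marker substring test, on every string
lemma scan_eq (s : List Char) :
    scanForbidden s = forbiddenMarkers.any (fun m => PySem.Chars.isIn m s) := by
  induction s with
  | nil => decide
  | cons c rest ih =>
    have hsplit : forbiddenMarkers.any (fun m => PySem.Chars.isIn m (c :: rest))
        = (forbiddenMarkers.any (fun m => PySem.Chars.startswith (c :: rest) m)
            || forbiddenMarkers.any (fun m => PySem.Chars.isIn m rest)) := by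
      rw [Bool.eq_iff_iff]
      simp only [Bool.or_eq_true, List.any_eq_true, isIn_cons]
      constructor
      · rintro ⟨m, hm, h | h⟩
        exacts [Or.inl ⟨m, hm, h⟩, Or.inr ⟨m, hm, h⟩]
      · rintro (⟨m, hm, h⟩ | ⟨m, hm, h⟩)
        exacts [⟨m, hm, Or.inl h⟩, ⟨m, hm, Or.inr h⟩]
    rw [hsplit, dispatch_eq, ← ih]
    show scanForbidden (c :: rest) = _
    rw [scanForbidden_cons]
    cases markerFor c <;> simp

-- text.strip() == '' means every character is whitespace
lemma all_isspace_of_strip_nil (s : List Char) (h : PySem.Chars.strip s = []) :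
    ∀ c ∈ s, PySem.Chars.isspace c = true := by
  unfold PySem.Chars.strip PySem.Chars.rstrip PySem.Chars.lstrip at h
  have h1 : List.dropWhile PySem.Chars.isspace
      (List.dropWhile PySem.Chars.isspace s).reverse = [] := by
    simpa using congrArg List.reverse h
  have h2 : ∀ c ∈ List.dropWhile PySem.Chars.isspace s, PySem.Chars.isspace c = true := by
    intro c hc
    exact List.dropWhile_eq_nil_iff.mp h1 c (List.mem_reverse.mpr hc)
  intro c hc
  rw [← List.takeWhile_append_dropWhile (p := PySem.Chars.isspace) (l := s)] at hc
  rcases List.mem_append.mp hc with hc | hc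
  · exact List.mem_takeWhile_imp hc
  · exact h2 c hc

-- a whitespace character is neither uppercase nor a marker's first character
lemma lowerChar_of_isspace (c : Char) (h : PySem.Chars.isspace c = true) :
    PySem.Chars.lowerChar c = c := by
  unfold PySem.Chars.lowerChar PySem.Chars.isupper
  unfold PySem.Chars.isspace at h
  have hA : 'A'.toNat = 65 := by decide
  have hZ : 'Z'.toNat = 90 := by decide
  simp only [Bool.or_eq_true, Bool.and_eq_true, decide_eq_true_eq] at h ⊢
  rw [if_neg]
  rintro ⟨hl, hr⟩
  have hl' : 65 ≤ c.toNat := Nat.succ_le_of_lt hl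
  have hr' : c.toNat ≤ 90 := Fin.mk_le_mk.mp hr
  omega

lemma markerFor_of_isspace (c : Char) (h : PySem.Chars.isspace c = true) :
    markerFor c = none := by
  unfold markerFor
  split_ifs with h1 h2 h3 h4 h5 h6 h7 h8 h9 <;>
    first
      | rfl
      | (subst_vars; exact absurd h (by decide))

-- B returns False on all-whitespace text (A's strip() guard case)
lemma scan_of_all_isspace (s : List Char) (hsp : ∀ c ∈ s, PySem.Chars.isspace c = true) :
    scanForbidden (PySem.Chars.lower s) = false := by
  induction s with
  | nil => rfl
  | cons c rest ih =>
    have hc := hsp c (List.mem_cons_self ..)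
    have : PySem.Chars.lower (c :: rest)
        = PySem.Chars.lowerChar c :: PySem.Chars.lower rest := rfl
    rw [this, lowerChar_of_isspace c hc]
    unfold scanForbidden
    rw [markerFor_of_isspace c hc]
    exact ih (fun x hx => hsp x (List.mem_cons_of_mem _ hx))

-- ===== VERDICT (by name: the statement is the Claim_ definition above) =====
theorem is_forbidden_content_py_spec : Claim_equal_is_forbidden_content_py := by
  intro text _
  unfold Spec_is_forbidden_content_py is_forbidden_content_py is_forbidden_content_py_alt
  split
  case isTrue h =>
    exact (scan_of_all_isspace text.toList (all_isspace_of_strip_nil text.toList h)).symm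
  case isFalse h =>
    exact (scan_eq (PySem.Chars.lower text.toList)).symm
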